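-- pv_equiv track=rewrite | github.com/daniel347x/workflowy-mcp-fixed | markdown_roundtrip.py | _strip_md_ast_beacon_block
-- ===== SOURCE A (Python) =====
-- from typing import Dict, Any, List, Optional
--
-- def _strip_md_ast_beacon_block(note_text: str | None) -> str:
--     """Remove the BEACON (MD AST) metadata block from note text before emission."""
--     if not isinstance(note_text, str):
--         return ""
--
--     lines = note_text.splitlines()
--     start_idx: Optional[int] = None
--     for idx, raw in enumerate(lines):
--         if raw.strip().startswith("BEACON (MD AST)"):
--             start_idx = idx
--             break
--
--     if start_idx is None:
--         cleaned = lines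
--     else:
--         end_idx = start_idx + 1
--         while end_idx < len(lines):
--             if lines[end_idx].strip() == "---":
--                 end_idx += 1
--                 break
--             end_idx += 1
--         while end_idx < len(lines) and not lines[end_idx].strip():
--             end_idx += 1
--         cleaned = lines[:start_idx] + lines[end_idx:]
--
--     while cleaned and not cleaned[0].strip():
--         cleaned.pop(0)
--     while cleaned and not cleaned[-1].strip():
--         cleaned.pop()
--     return "\n".join(cleaned)
-- ===== SOURCE B (Python) =====
-- def _strip_md_ast_beacon_block(note_text):
--     """Single forward pass with a mode flag instead of index search + slice splicing."""
--     if not isinstance(note_text, str):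
--         return ""
--     out = []
--     mode = "copy"
--     for line in note_text.splitlines():
--         if mode == "copy":
--             if line.strip().startswith("BEACON (MD AST)"):
--                 mode = "skip"
--             else:
--                 out.append(line)
--         elif mode == "skip":
--             if line.strip() == "---":
--                 mode = "blanks"
--         elif mode == "blanks":
--             if line.strip():
--                 out.append(line)
--                 mode = "done"
--         else:
--             out.append(line)
--     start = 0
--     while start < len(out) and not out[start].strip():
--         start += 1
--     end = len(out)
--     while end > start and not out[end - 1].strip():
--         end -= 1
--     return "\n".join(out[start:end])
-- ===== Notes on version B (the rewrite author's own statement) =====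
-- stated objective: alternative
-- what changed: Replaces A's beacon-index search plus two index-advancing while loops and slice splicing (and pop-based blank trimming) with a single forward pass over the lines driven by a mode flag (copy/skip/blanks/done), followed by an index-window blank trim and one slice.
import Mathlib
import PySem

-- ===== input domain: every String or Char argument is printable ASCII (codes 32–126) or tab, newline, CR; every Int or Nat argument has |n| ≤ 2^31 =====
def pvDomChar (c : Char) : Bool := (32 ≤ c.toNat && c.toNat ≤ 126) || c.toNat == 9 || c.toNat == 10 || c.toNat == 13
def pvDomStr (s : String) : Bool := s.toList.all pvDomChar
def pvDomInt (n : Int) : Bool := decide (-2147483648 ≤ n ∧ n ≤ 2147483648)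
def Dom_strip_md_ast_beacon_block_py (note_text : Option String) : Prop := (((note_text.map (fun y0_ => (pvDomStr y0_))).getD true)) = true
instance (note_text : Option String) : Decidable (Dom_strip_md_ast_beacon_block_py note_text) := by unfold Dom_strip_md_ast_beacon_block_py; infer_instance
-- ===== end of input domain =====

-- B rewrites A's find-the-beacon + in-place slice splicing + pop-loops as one forward pass
-- over the lines with a mode flag, followed by an index-based blank trim (objective: alternative).

-- ===== PORT A =====
-- for idx, raw in enumerate(lines): if raw.strip().startswith("BEACON (MD AST)"): start_idx = idx; break
def pvAFind : List String → Nat → Option Nat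
  | [], _ => none
  | l :: r, idx =>
    if PySem.Str.startswith (PySem.Str.strip l) "BEACON (MD AST)" then some idx
    else pvAFind r (idx + 1)

-- while end_idx < len(lines): if lines[end_idx].strip() == "---": end_idx += 1; break; end_idx += 1
def pvAEnd (lines : List String) (e : Nat) : Nat :=
  if h : e < lines.length then
    if PySem.Str.strip lines[e] == "---" then e + 1 else pvAEnd lines (e + 1)
  else e
termination_by lines.length - e

-- while end_idx < len(lines) and not lines[end_idx].strip(): end_idx += 1
def pvABlank (lines : List String) (e : Nat) : Nat :=
  if h : e < lines.length then
    if PySem.Str.strip lines[e] == "" then pvABlank lines (e + 1) else e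
  else e
termination_by lines.length - e

-- while cleaned and not cleaned[0].strip(): cleaned.pop(0)
def pvATrimLead : List String → List String
  | [] => []
  | l :: r => if PySem.Str.strip l == "" then pvATrimLead r else l :: r

-- while cleaned and not cleaned[-1].strip(): cleaned.pop()
def pvATrimTrail (xs : List String) : List String :=
  if xs.getLast?.any (fun l => PySem.Str.strip l == "") then pvATrimTrail xs.dropLast
  else xs
termination_by xs.length
decreasing_by
  have hne : xs ≠ [] := by intro he; subst he; simp_all
  have := List.length_pos_of_ne_nil hne
  simp [List.length_dropLast]; omega

def strip_md_ast_beacon_block_py (note_text : Option String) : String :=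
  match note_text with
  | none => ""
  | some s =>
    let lines := PySem.Str.splitlines s
    let cleaned :=
      match pvAFind lines 0 with
      | none => lines
      | some start =>
        PySem.List.slice lines none (some (start : Int)) ++
          PySem.List.slice lines (some ((pvABlank lines (pvAEnd lines (start + 1)) : Nat) : Int)) none
    PySem.Str.join "\n" (pvATrimTrail (pvATrimLead cleaned))

-- ===== PORT B =====
-- the for-loop of Source B: mode 0 = "copy", 1 = "skip", 2 = "blanks", 3 = "done"
def pvBLoop (mode : Nat) : List String → List String
  | [] => []
  | l :: r =>
    if mode == 0 then
      if PySem.Str.startswith (PySem.Str.strip l) "BEACON (MD AST)" then pvBLoop 1 r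
      else l :: pvBLoop 0 r
    else if mode == 1 then
      if PySem.Str.strip l == "---" then pvBLoop 2 r else pvBLoop 1 r
    else if mode == 2 then
      if PySem.Str.strip l == "" then pvBLoop 2 r else l :: pvBLoop 3 r
    else l :: pvBLoop 3 r

-- while start < len(out) and not out[start].strip(): start += 1
def pvBStart (out : List String) (i : Nat) : Nat :=
  if h : i < out.length then
    if PySem.Str.strip out[i] == "" then pvBStart out (i + 1) else i
  else i
termination_by out.length - i

-- while end > start and not out[end - 1].strip(): end -= 1
def pvBEnd (out : List String) (s e : Nat) : Nat :=
  if s < e ∧ PySem.Str.strip (out.getD (e - 1) "") == "" then pvBEnd out s (e - 1)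
  else e
termination_by e
decreasing_by omega

def strip_md_ast_beacon_block_py_alt (note_text : Option String) : String :=
  match note_text with
  | none => ""
  | some s =>
    let out := pvBLoop 0 (PySem.Str.splitlines s)
    let start := pvBStart out 0
    let stop := pvBEnd out start out.length
    PySem.Str.join "\n" (PySem.List.slice out (some (start : Int)) (some (stop : Int)))

-- ===== PRECONDITION & SPEC =====
def Spec_strip_md_ast_beacon_block_py (note_text : Option String) (out : String) : Prop := out = strip_md_ast_beacon_block_py_alt note_text
instance (note_text : Option String) (out : String) : Decidable (Spec_strip_md_ast_beacon_block_py note_text out) := by unfold Spec_strip_md_ast_beacon_block_py; infer_instance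

-- ===== CLAIM (what is proved, stated in full; the proofs are below) =====
def Claim_equal_strip_md_ast_beacon_block_py : Prop := ∀ (note_text : Option String), Dom_strip_md_ast_beacon_block_py note_text → Spec_strip_md_ast_beacon_block_py note_text (strip_md_ast_beacon_block_py note_text)

-- ===== LEMMAS AND PROOFS =====

def pvBlank (l : String) : Bool := PySem.Str.strip l == ""

-- shift lemmas for the index loops
theorem pvAEnd_cons (l : String) (r : List String) (e : Nat) :
    pvAEnd (l :: r) (e + 1) = pvAEnd r e + 1 := by
  have H : ∀ d e, r.length - e ≤ d → pvAEnd (l :: r) (e + 1) = pvAEnd r e + 1 := by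
    intro d
    induction d with
    | zero =>
      intro e he
      conv_lhs => rw [pvAEnd]
      conv_rhs => rw [pvAEnd]
      have h1 : ¬ e < r.length := by omega
      simp [h1]
    | succ d ih =>
      intro e he
      conv_lhs => rw [pvAEnd]
      conv_rhs => rw [pvAEnd]
      by_cases h : e < r.length
      · have h2 : e + 1 < (l :: r).length := by simp; omega
        simp only [h, h2, dif_pos, List.getElem_cons_succ]
        split
        · rfl
        · exact ih (e + 1) (by omega)
      · have h2 : ¬ e + 1 < (l :: r).length := by simp; omega
        simp [h]
  exact H _ e le_rfl

theorem pvABlank_cons (l : String) (r : List String) (e : Nat) :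
    pvABlank (l :: r) (e + 1) = pvABlank r e + 1 := by
  have H : ∀ d e, r.length - e ≤ d → pvABlank (l :: r) (e + 1) = pvABlank r e + 1 := by
    intro d
    induction d with
    | zero =>
      intro e he
      conv_lhs => rw [pvABlank]
      conv_rhs => rw [pvABlank]
      have h1 : ¬ e < r.length := by omega
      simp [h1]
    | succ d ih =>
      intro e he
      conv_lhs => rw [pvABlank]
      conv_rhs => rw [pvABlank]
      by_cases h : e < r.length
      · have h2 : e + 1 < (l :: r).length := by simp; omega
        simp only [h, h2, dif_pos, List.getElem_cons_succ]
        split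
        · exact ih (e + 1) (by omega)
        · rfl
      · have h2 : ¬ e + 1 < (l :: r).length := by simp; omega
        simp [h]
  exact H _ e le_rfl

theorem pvBStart_cons (l : String) (r : List String) (e : Nat) :
    pvBStart (l :: r) (e + 1) = pvBStart r e + 1 := by
  have H : ∀ d e, r.length - e ≤ d → pvBStart (l :: r) (e + 1) = pvBStart r e + 1 := by
    intro d
    induction d with
    | zero =>
      intro e he
      conv_lhs => rw [pvBStart]
      conv_rhs => rw [pvBStart]
      have h1 : ¬ e < r.length := by omega
      simp [h1]
    | succ d ih =>
      intro e he
      conv_lhs => rw [pvBStart]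
      conv_rhs => rw [pvBStart]
      by_cases h : e < r.length
      · have h2 : e + 1 < (l :: r).length := by simp; omega
        simp only [h, h2, dif_pos, List.getElem_cons_succ]
        split
        · exact ih (e + 1) (by omega)
        · rfl
      · have h2 : ¬ e + 1 < (l :: r).length := by simp; omega
        simp [h]
  exact H _ e le_rfl

-- the blank-skip loops are dropWhile
theorem drop_pvABlank (xs : List String) : xs.drop (pvABlank xs 0) = xs.dropWhile pvBlank := by
  induction xs with
  | nil => simp [pvABlank]
  | cons l r ih =>
    rw [pvABlank]
    have h : 0 < (l :: r).length := by simp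
    simp only [h, dif_pos, List.getElem_cons_zero]
    by_cases hb : PySem.Str.strip l == ""
    · rw [if_pos hb, pvABlank_cons, List.drop_succ_cons, ih, List.dropWhile_cons,
        show pvBlank l = true from hb]
      simp
    · rw [if_neg hb, List.drop_zero, List.dropWhile_cons, show pvBlank l = false from by
        simpa [pvBlank] using hb]
      simp

theorem drop_pvBStart (xs : List String) : xs.drop (pvBStart xs 0) = xs.dropWhile pvBlank := by
  induction xs with
  | nil => simp [pvBStart]
  | cons l r ih =>
    rw [pvBStart]
    have h : 0 < (l :: r).length := by simp
    simp only [h, dif_pos, List.getElem_cons_zero]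
    by_cases hb : PySem.Str.strip l == ""
    · rw [if_pos hb, pvBStart_cons, List.drop_succ_cons, ih, List.dropWhile_cons,
        show pvBlank l = true from hb]
      simp
    · rw [if_neg hb, List.drop_zero, List.dropWhile_cons, show pvBlank l = false from by
        simpa [pvBlank] using hb]
      simp

theorem pvBStart_le (xs : List String) : ∀ i, i ≤ xs.length → pvBStart xs i ≤ xs.length := by
  intro i
  have H : ∀ d i, xs.length - i ≤ d → i ≤ xs.length → pvBStart xs i ≤ xs.length := by
    intro d
    induction d with
    | zero =>
      intro i hd hi
      rw [pvBStart]
      have : ¬ i < xs.length := by omega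
      simp [this]; omega
    | succ d ih =>
      intro i hd hi
      rw [pvBStart]
      by_cases h : i < xs.length
      · simp only [h, dif_pos]
        split
        · exact ih (i + 1) (by omega) (by omega)
        · omega
      · simp [h]; omega
  exact fun hi => H _ i le_rfl hi

-- B's done/blanks/skip modes, as list functions
theorem pvBLoop_three (xs : List String) : pvBLoop 3 xs = xs := by
  induction xs with
  | nil => rfl
  | cons l r ih => rw [pvBLoop]; simp [ih]

theorem pvBLoop_two (xs : List String) : pvBLoop 2 xs = xs.dropWhile pvBlank := by
  induction xs with
  | nil => rfl
  | cons l r ih =>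
    rw [pvBLoop, List.dropWhile_cons]
    by_cases hb : PySem.Str.strip l = ""
    · simp [pvBlank, hb, ih]
    · simp [pvBlank, hb, pvBLoop_three]

-- A's end-scan + blank-scan equals B's skip mode
theorem pvSkip_eq (xs : List String) :
    xs.drop (pvABlank xs (pvAEnd xs 0)) = pvBLoop 1 xs := by
  induction xs with
  | nil => simp [pvAEnd, pvABlank, pvBLoop]
  | cons l r ih =>
    rw [pvAEnd]
    have h : 0 < (l :: r).length := by simp
    simp only [h, dif_pos, List.getElem_cons_zero]
    by_cases hd : PySem.Str.strip l = "---"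
    · rw [if_pos (by simp [hd])]
      rw [pvABlank_cons, List.drop_succ_cons, drop_pvABlank]
      rw [pvBLoop]
      simp [hd, pvBLoop_two]
    · rw [if_neg (by simp [hd])]
      rw [pvAEnd_cons, pvABlank_cons, List.drop_succ_cons, ih]
      rw [pvBLoop]
      simp [hd]

-- A's find + splice equals B's copy mode
theorem pvClean_eq (xs : List String) :
    (match pvAFind xs 0 with
      | none => xs
      | some start => xs.take start ++ xs.drop (pvABlank xs (pvAEnd xs (start + 1)))) =
    pvBLoop 0 xs := by
  have F : ∀ (ys : List String) i, pvAFind ys (i + 1) = (pvAFind ys i).map (· + 1) := by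
    intro ys
    induction ys with
    | nil => intro i; rfl
    | cons l r ih =>
      intro i
      rw [pvAFind, pvAFind]
      split
      · rfl
      · exact ih (i + 1)
  induction xs with
  | nil => rfl
  | cons l r ih =>
    rw [pvAFind]
    by_cases hb : PySem.Str.startswith (PySem.Str.strip l) "BEACON (MD AST)" = true
    · rw [if_pos hb]
      have hr : pvBLoop 0 (l :: r) = pvBLoop 1 r := by
        rw [pvBLoop]; simp only [hb]; simp
      rw [hr]
      show (l :: r).take 0 ++ (l :: r).drop (pvABlank (l :: r) (pvAEnd (l :: r) (0 + 1))) =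
        pvBLoop 1 r
      rw [pvAEnd_cons, pvABlank_cons, List.drop_succ_cons]
      simpa using pvSkip_eq r
    · rw [if_neg hb]
      have hr : pvBLoop 0 (l :: r) = l :: pvBLoop 0 r := by
        simp only [Bool.not_eq_true] at hb
        rw [pvBLoop]; simp only [hb]; simp
      rw [hr, F r 0]
      cases hf : pvAFind r 0 with
      | none =>
        rw [hf] at ih
        exact congrArg (l :: ·) ih
      | some j =>
        rw [hf] at ih
        show (l :: r).take (j + 1) ++
            (l :: r).drop (pvABlank (l :: r) (pvAEnd (l :: r) (j + 1 + 1))) =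
          l :: pvBLoop 0 r
        rw [pvAEnd_cons, pvABlank_cons, List.drop_succ_cons, List.take_succ_cons,
          List.cons_append]
        exact congrArg (l :: ·) ih

-- trailing trim of A is reverse-dropWhile-reverse
theorem pvATrimTrail_eq (xs : List String) :
    pvATrimTrail xs = (xs.reverse.dropWhile pvBlank).reverse := by
  induction xs using List.reverseRecOn with
  | nil => rw [pvATrimTrail]; simp
  | append_singleton ys l ih =>
    rw [pvATrimTrail]
    by_cases hb : PySem.Str.strip l = ""
    · rw [if_pos (by simp [hb])]
      rw [List.dropLast_concat, ih]
      simp [List.reverse_append, pvBlank, hb]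
    · rw [if_neg (by simp [hb])]
      simp [List.reverse_append, pvBlank, hb]

-- leading trim of A is dropWhile
theorem pvATrimLead_eq (xs : List String) : pvATrimLead xs = xs.dropWhile pvBlank := by
  induction xs with
  | nil => rfl
  | cons l r ih =>
    rw [pvATrimLead, List.dropWhile_cons]
    by_cases hb : PySem.Str.strip l == ""
    · rw [if_pos hb, ih]; simp [show pvBlank l = true from hb]
    · rw [if_neg hb]; simp [show pvBlank l = false from by simpa [pvBlank] using hb]

-- B's downward end-scan yields the reverse trim of the sliced window
theorem pvBEnd_eq (xs : List String) (s : Nat) :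
    ∀ e, s ≤ e → e ≤ xs.length →
      (xs.drop s).take (pvBEnd xs s e - s) =
        (((xs.drop s).take (e - s)).reverse.dropWhile pvBlank).reverse := by
  intro e
  induction e with
  | zero =>
    intro hs he
    have : s = 0 := by omega
    subst this
    rw [pvBEnd]
    simp
  | succ e ih =>
    intro hs he
    rw [pvBEnd]
    have helt : e < xs.length := by omega
    have hget : xs.getD e "" = xs[e] := by
      simp [List.getD, List.getElem?_eq_getElem helt]
    have hsplit : s ≤ e → (xs.drop s).take (e + 1 - s) = (xs.drop s).take (e - s) ++ [xs[e]] := by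
      intro hse0
      have h1 : e + 1 - s = (e - s) + 1 := by omega
      rw [h1, List.take_add_one]
      have h2 : (xs.drop s)[e - s]? = some xs[e] := by
        rw [List.getElem?_drop]
        have : s + (e - s) = e := by omega
        rw [this, List.getElem?_eq_getElem helt]
      rw [h2]
      rfl
    by_cases hc : s < e + 1 ∧ PySem.Str.strip (xs.getD (e + 1 - 1) "") == ""
    · rw [if_pos hc]
      obtain ⟨hc1, hc2⟩ := hc
      have hse : s ≤ e := by omega
      have hb : pvBlank xs[e] = true := by
        simp only [show e + 1 - 1 = e from rfl, hget] at hc2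
        exact hc2
      rw [show e + 1 - 1 = e from rfl]
      rw [ih hse (by omega), hsplit hse]
      rw [List.reverse_append]
      simp [hb]
    · rw [if_neg hc]
      by_cases hse : s = e + 1
      · subst hse
        simp
      · have hse' : s ≤ e := by omega
        have hb : pvBlank xs[e] = false := by
          have : ¬ PySem.Str.strip (xs.getD (e + 1 - 1) "") == "" := by
            intro hh
            exact hc ⟨by omega, hh⟩
          simp only [show e + 1 - 1 = e from rfl, hget] at this
          simpa [pvBlank] using this
        rw [hsplit hse', List.reverse_append]
        simp only [List.reverse_cons, List.reverse_nil, List.nil_append, List.singleton_append,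
          List.dropWhile_cons, hb, Bool.false_eq_true, if_false]
        simp

-- the two trimmed lists coincide
theorem pvTrim_eq (out : List String) :
    pvATrimTrail (pvATrimLead out) =
      (out.drop (pvBStart out 0)).take (pvBEnd out (pvBStart out 0) out.length - pvBStart out 0) := by
  have hs := pvBStart_le out 0 (by omega)
  rw [pvBEnd_eq out (pvBStart out 0) out.length hs le_rfl]
  have hlen : (out.drop (pvBStart out 0)).take (out.length - pvBStart out 0) =
      out.drop (pvBStart out 0) := by
    rw [← List.length_drop]
    exact List.take_length
  rw [hlen, drop_pvBStart, pvATrimLead_eq, pvATrimTrail_eq]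

-- ===== VERDICT (by name: the statement is the Claim_ definition above) =====
theorem pvMain (lines : List String) :
    PySem.Str.join "\n" (pvATrimTrail (pvATrimLead
      (match pvAFind lines 0 with
        | none => lines
        | some start =>
          PySem.List.slice lines none (some (start : Int)) ++
            PySem.List.slice lines
              (some ((pvABlank lines (pvAEnd lines (start + 1)) : Nat) : Int)) none))) =
    PySem.Str.join "\n" (PySem.List.slice (pvBLoop 0 lines)
      (some ((pvBStart (pvBLoop 0 lines) 0 : Nat) : Int))
      (some ((pvBEnd (pvBLoop 0 lines) (pvBStart (pvBLoop 0 lines) 0)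
        (pvBLoop 0 lines).length : Nat) : Int))) := by
  have hclean :
      (match pvAFind lines 0 with
        | none => lines
        | some start =>
          PySem.List.slice lines none (some (start : Int)) ++
            PySem.List.slice lines
              (some ((pvABlank lines (pvAEnd lines (start + 1)) : Nat) : Int)) none) =
      pvBLoop 0 lines := by
    rw [← pvClean_eq lines]
    cases hf : pvAFind lines 0 with
    | none => rfl
    | some start =>
      show PySem.List.slice lines none (some (start : Int)) ++
          PySem.List.slice lines
            (some ((pvABlank lines (pvAEnd lines (start + 1)) : Nat) : Int)) none =
        lines.take start ++ lines.drop (pvABlank lines (pvAEnd lines (start + 1)))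
      rw [PySem.List.slice_to_natCast, PySem.List.slice_from_natCast]
  rw [hclean, PySem.List.slice_natCast, pvTrim_eq]

-- ===== VERDICT (by name: the statement is the Claim_ definition above) =====
theorem strip_md_ast_beacon_block_py_spec : Claim_equal_strip_md_ast_beacon_block_py := by
  unfold Claim_equal_strip_md_ast_beacon_block_py
  intro note_text _
  unfold Spec_strip_md_ast_beacon_block_py
  cases note_text with
  | none => rfl
  | some s => exact pvMain (PySem.Str.splitlines s)
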